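-- pv_equiv track=rewrite | github.com/Bbalduzz/ValoSwitcher | main.py | get_level_number_appearance
-- ===== SOURCE A (Python) =====
-- def get_level_number_appearance(account_level):
--     closest_index = None
--     closest_url = None
--     level_borders_id = ('ebc736cd-4b6a-137b-e2b0-1486e31312c9', '5156a90d-4d65-58d0-f6a8-48a0c003878a', '9c4afb15-40d7-3557-062a-4bb198cb9958', 'e6238102-425c-a647-6685-e6af7f8982d9', '49413ac2-4ed5-6953-5791-db838ccb58f3', 'e05371e3-4ec4-a53e-168a-c49346a75c19', '7e7feff1-44c2-301e-767d-d9b2b1cd9051', '53d4ed03-4b29-5913-aeda-80a41afcef3a', '6f610ab6-4a21-63fd-ac19-4a9204bc2721', '547ac9dd-495d-f11d-d921-3fbd14604ae0', 'bd1082ab-462c-3fb8-e049-28a9750acf0f', '37a36996-41f3-6e26-c00b-46bf7c037482', '5d0d6c6c-4f0a-dc65-e506-b786cc27dbe1', '3635b061-4bf9-b937-55fe-44a4dd0ed3dc', 'ae5eda0d-476b-a159-959c-df93374f4a69', '3d90bc3a-4626-71d6-a17c-93ae14d05fb0', '674bbd9e-4a4f-208a-75fa-1d9dd7d7008f', 'd84cf377-4c21-1cdf-0260-4e8ebd9825f5',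 '6c1fb61e-46e5-2908-5048-d4866cb64c3d', 'af1852a5-4e66-02a6-2ae3-ab8c885efb80', 'cbd1914e-43f8-7ae5-38c4-228bcbe58756', 'c8a4abff-4ace-f0a3-c9f3-db936791a697', '086dd1ab-4889-793a-4b33-0a99e311fa25', '08ab72f1-4fce-ddb5-5fd5-22abd3bc9d49', '6694d7f7-4ab9-8545-5921-35a9ea8cec24')
--
--     try:
--         for i in range(len(level_borders_id)):
--             starting_level = i * 20 + 1
--             if starting_level <= account_level:
--                 closest_index = i
--             else:
--                 break
--     except Exception:
--         closest_index = 0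
--     if closest_index is not None and closest_index < len(level_borders_id):
--         closest_border_id = level_borders_id[closest_index]
--         closest_url = f"https://media.valorant-api.com/levelborders/{closest_border_id}/levelnumberappearance.png"
--
--     return closest_url
-- ===== SOURCE B (Python) =====
-- def get_level_number_appearance(account_level):
--     level_borders_id = ('ebc736cd-4b6a-137b-e2b0-1486e31312c9', '5156a90d-4d65-58d0-f6a8-48a0c003878a', '9c4afb15-40d7-3557-062a-4bb198cb9958', 'e6238102-425c-a647-6685-e6af7f8982d9', '49413ac2-4ed5-6953-5791-db838ccb58f3', 'e05371e3-4ec4-a53e-168a-c49346a75c19', '7e7feff1-44c2-301e-767d-d9b2b1cd9051', '53d4ed03-4b29-5913-aeda-80a41afcef3a', '6f610ab6-4a21-63fd-ac19-4a9204bc2721', '547ac9dd-495d-f11d-d921-3fbd14604ae0', 'bd1082ab-462c-3fb8-e049-28a9750acf0f', '37a36996-41f3-6e26-c00b-46bf7c037482', '5d0d6c6c-4f0a-dc65-e506-b786cc27dbe1', '3635b061-4bf9-b937-55fe-44a4dd0ed3dc', 'ae5eda0d-476b-a159-959c-df93374f4a69', '3d90bc3a-4626-71d6-a17c-93ae14d05fb0',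 '674bbd9e-4a4f-208a-75fa-1d9dd7d7008f', 'd84cf377-4c21-1cdf-0260-4e8ebd9825f5', '6c1fb61e-46e5-2908-5048-d4866cb64c3d', 'af1852a5-4e66-02a6-2ae3-ab8c885efb80', 'cbd1914e-43f8-7ae5-38c4-228bcbe58756', 'c8a4abff-4ace-f0a3-c9f3-db936791a697', '086dd1ab-4889-793a-4b33-0a99e311fa25', '08ab72f1-4fce-ddb5-5fd5-22abd3bc9d49', '6694d7f7-4ab9-8545-5921-35a9ea8cec24')
--     if account_level < 1:
--         return None
--     index = min((account_level - 1) // 20, len(level_borders_id) - 1)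
--     return f"https://media.valorant-api.com/levelborders/{level_borders_id[index]}/levelnumberappearance.png"
-- ===== Notes on version B (the rewrite author's own statement) =====
-- stated objective: simpler
-- what changed: Replaces A's scan over all 25 tier indices (with break and loop-carried closest_index) by a direct closed-form index min((account_level-1)//20, 24) after an account_level < 1 guard.
import Mathlib
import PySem

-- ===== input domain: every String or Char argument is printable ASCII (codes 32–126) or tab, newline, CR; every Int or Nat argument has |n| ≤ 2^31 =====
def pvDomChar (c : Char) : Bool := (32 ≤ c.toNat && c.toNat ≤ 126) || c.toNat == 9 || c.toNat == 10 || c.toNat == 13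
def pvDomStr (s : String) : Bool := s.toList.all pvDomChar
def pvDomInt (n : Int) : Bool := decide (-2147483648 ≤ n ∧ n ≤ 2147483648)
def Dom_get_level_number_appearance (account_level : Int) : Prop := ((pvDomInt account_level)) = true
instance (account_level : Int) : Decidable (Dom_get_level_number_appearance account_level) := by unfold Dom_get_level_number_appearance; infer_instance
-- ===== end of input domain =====

-- B replaces A's linear scan for the border tier with a closed-form floor-division index (simpler, constant vs linear scan).


-- ===== PORT A =====
def pvBorders : List String := ["ebc736cd-4b6a-137b-e2b0-1486e31312c9", "5156a90d-4d65-58d0-f6a8-48a0c003878a", "9c4afb15-40d7-3557-062a-4bb198cb9958", "e6238102-425c-a647-6685-e6af7f8982d9", "49413ac2-4ed5-6953-5791-db838ccb58f3", "e05371e3-4ec4-a53e-168a-c49346a75c19", "7e7feff1-44c2-301e-767d-d9b2b1cd9051", "53d4ed03-4b29-5913-aeda-80a41afcef3a", "6f610ab6-4a21-63fd-ac19-4a9204bc2721", "547ac9dd-495d-f11d-d921-3fbd14604ae0", "bd1082ab-462c-3fb8-e049-28a9750acf0f", "37a36996-41f3-6e26-c00b-46bf7c037482", "5d0d6c6c-4f0a-dc65-e506-b786cc27dbe1",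 "3635b061-4bf9-b937-55fe-44a4dd0ed3dc", "ae5eda0d-476b-a159-959c-df93374f4a69", "3d90bc3a-4626-71d6-a17c-93ae14d05fb0", "674bbd9e-4a4f-208a-75fa-1d9dd7d7008f", "d84cf377-4c21-1cdf-0260-4e8ebd9825f5", "6c1fb61e-46e5-2908-5048-d4866cb64c3d", "af1852a5-4e66-02a6-2ae3-ab8c885efb80", "cbd1914e-43f8-7ae5-38c4-228bcbe58756", "c8a4abff-4ace-f0a3-c9f3-db936791a697", "086dd1ab-4889-793a-4b33-0a99e311fa25", "08ab72f1-4fce-ddb5-5fd5-22abd3bc9d49", "6694d7f7-4ab9-8545-5921-35a9ea8cec24"]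

def pvUrl (bid : String) : String :=
  "https://media.valorant-api.com/levelborders/" ++ bid ++ "/levelnumberappearance.png"

-- A's for-loop with break: i runs over the remaining indices, acc is closest_index
def pvALoop (n : Int) : List Nat → Option Nat → Option Nat
  | [], acc => acc
  | i :: rest, acc =>
      if ((i : Int) * 20 + 1) ≤ n then pvALoop n rest (some i) else acc

def get_level_number_appearance (account_level : Int) : Option String :=
  match pvALoop account_level (List.range pvBorders.length) none with
  | some k =>
      if k < pvBorders.length then
        match PySem.List.pyGet? pvBorders (k : Int) with
        | some bid => some (pvUrl bid)
        | none => none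
      else none
  | none => none

-- ===== PORT B =====
def get_level_number_appearance_alt (account_level : Int) : Option String :=
  if account_level < 1 then none
  else
    match PySem.List.pyGet? pvBorders
        (min (PySem.Int.floordiv (account_level - 1) 20) ((pvBorders.length : Int) - 1)) with
    | some bid => some (pvUrl bid)
    | none => none

-- ===== PRECONDITION & SPEC =====
def Spec_get_level_number_appearance (account_level : Int) (out : Option String) : Prop := out = get_level_number_appearance_alt account_level
instance (account_level : Int) (out : Option String) : Decidable (Spec_get_level_number_appearance account_level out) := by unfold Spec_get_level_number_appearance; infer_instance

-- ===== CLAIM (what is proved, stated in full; the proofs are below) =====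
def Claim_equal_get_level_number_appearance : Prop := ∀ (account_level : Int), Dom_get_level_number_appearance account_level → Spec_get_level_number_appearance account_level (get_level_number_appearance account_level)

-- ===== LEMMAS AND PROOFS =====

-- A's loop over indices [s, s+1, …, s+c-1]: if the first tier start s*20+1 is not
-- reached, acc survives; otherwise the result is the capped floor-division index.
theorem pvALoop_range' (n : Int) (c s : Nat) (acc : Option Nat) :
    pvALoop n (List.range' s c) acc =
      if ((s : Int) * 20 + 1) ≤ n ∧ 0 < c then
        some (min ((n - 1) / 20).toNat (s + c - 1))
      else acc := by
  induction c generalizing s acc with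
  | zero => simp [List.range', pvALoop]
  | succ c ih =>
      rw [List.range'_succ]
      simp only [pvALoop]
      by_cases h : ((s : Int) * 20 + 1) ≤ n
      · rw [if_pos h, ih]
        by_cases hc : ((s : Int) + 1) * 20 + 1 ≤ n ∧ 0 < c
        · rw [if_pos (by push_cast; exact_mod_cast hc), if_pos ⟨h, Nat.succ_pos c⟩]
          congr 1
          omega
        · rw [if_neg (by push_cast at hc ⊢; exact_mod_cast hc), if_pos ⟨h, Nat.succ_pos c⟩]
          congr 1
          rcases Classical.not_and_iff_not_or_not.mp hc with h' | h'
          · have hub : n ≤ (s : Int) * 20 + 20 := by omega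
            omega
          · have hc0 : c = 0 := by omega
            subst hc0
            have hdge : (s : Int) ≤ (n - 1) / 20 := by omega
            omega
      · rw [if_neg h, if_neg (by omega)]

theorem pvALoop_spec (n : Int) :
    pvALoop n (List.range pvBorders.length) none =
      if 1 ≤ n then some (min ((n - 1) / 20).toNat 24) else none := by
  have : List.range pvBorders.length = List.range' 0 25 := by decide
  rw [this, pvALoop_range' n 25 0 none]
  split_ifs with h1 h2 h3 <;> simp_all

-- ===== VERDICT (by name: the statement is the Claim_ definition above) =====
theorem get_level_number_appearance_spec : Claim_equal_get_level_number_appearance := by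
  intro n _
  unfold Spec_get_level_number_appearance get_level_number_appearance get_level_number_appearance_alt
  rw [pvALoop_spec]
  by_cases h : 1 ≤ n
  · rw [if_pos h, if_neg (by omega)]
    have hfd : PySem.Int.floordiv (n - 1) 20 = (n - 1) / 20 :=
      PySem.Int.floordiv_eq_ediv_of_pos (by omega)
    have hnn : 0 ≤ (n - 1) / 20 := Int.ediv_nonneg (by omega) (by omega)
    have hlen : (pvBorders.length : Int) - 1 = 24 := by decide
    have hmin : min (PySem.Int.floordiv (n - 1) 20) ((pvBorders.length : Int) - 1)
        = ((min ((n - 1) / 20).toNat 24 : Nat) : Int) := by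
      rw [hfd, hlen]
      omega
    have hk : min ((n - 1) / 20).toNat 24 < pvBorders.length := by
      have : pvBorders.length = 25 := by decide
      omega
    simp only [hmin, hk, if_true, PySem.List.pyGet?_natCast]
  · rw [if_neg h, if_pos (by omega)]
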